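-- pv_equiv track=rewrite | github.com/jaehyeonkim2358/algorithm | programmers/[naver] 84021.py | bfs
-- ===== SOURCE A (Python) =====
-- from collections import deque
--
-- def bfs(start: tuple, table: list, key: int):
--     not_key = ((key+1)<<3)
--     move = ((1,0),(0,1),(-1,0),(0,-1))
--     size = len(table)
--     queue = deque([start])
--     block = [[start[0], start[1]], ]
--     min_x, min_y = start[1], start[0]
--     while queue:
--         y, x = queue.popleft()
--         for dy, dx in move:
--             ny = y+dy
--             nx = x+dx
--             if 0<=ny<size and 0<=nx<size and table[ny][nx]==key:
--                 table[ny][nx] = not_key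
--                 queue.append((ny, nx))
--                 block.append([ny, nx])
--                 min_y = min(min_y, ny)
--                 min_x = min(min_x, nx)
--     block.append([min_y, min_x])
--     return block
-- ===== SOURCE B (Python) =====
-- def bfs(start: tuple, table: list, key: int):
--     # Level-synchronous BFS: no queue at all -- process the whole current
--     # frontier, collect the next frontier, swap; the minima are computed by a
--     # separate pass after the traversal instead of being threaded through it.
--     # Mutates `table` in place exactly as A does.
--     not_key = ((key + 1) << 3)
--     move = ((1, 0), (0, 1), (-1, 0), (0, -1))
--     size = len(table)
--     block = [[start[0], start[1]]]
--     frontier = [start]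
--     while frontier:
--         nxt = []
--         for y, x in frontier:
--             for dy, dx in move:
--                 ny = y + dy
--                 nx = x + dx
--                 if 0 <= ny < size and 0 <= nx < size and table[ny][nx] == key:
--                     table[ny][nx] = not_key
--                     nxt.append((ny, nx))
--         block += [[y, x] for y, x in nxt]
--         frontier = nxt
--     min_y = min(c[0] for c in block)
--     min_x = min(c[1] for c in block)
--     block.append([min_y, min_x])
--     return block
-- ===== Notes on version B (the rewrite author's own statement) =====
-- stated objective: alternative
-- what changed: The FIFO deque is replaced by level-synchronous (frontier-swap) BFS: each iteration expands the entire current frontier into a next-frontier list with no queue maintained, and the min_y/min_x accumulators threaded through A's loop are replaced by a separate reduction over the collected block after the traversal.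
-- outside the precondition, e.g. on bfs((5, 5), [[1], [0, 0]], 1): A returns [[5, 5], [5, 5]], B returns [[5, 5], [5, 5]]
import Mathlib
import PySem

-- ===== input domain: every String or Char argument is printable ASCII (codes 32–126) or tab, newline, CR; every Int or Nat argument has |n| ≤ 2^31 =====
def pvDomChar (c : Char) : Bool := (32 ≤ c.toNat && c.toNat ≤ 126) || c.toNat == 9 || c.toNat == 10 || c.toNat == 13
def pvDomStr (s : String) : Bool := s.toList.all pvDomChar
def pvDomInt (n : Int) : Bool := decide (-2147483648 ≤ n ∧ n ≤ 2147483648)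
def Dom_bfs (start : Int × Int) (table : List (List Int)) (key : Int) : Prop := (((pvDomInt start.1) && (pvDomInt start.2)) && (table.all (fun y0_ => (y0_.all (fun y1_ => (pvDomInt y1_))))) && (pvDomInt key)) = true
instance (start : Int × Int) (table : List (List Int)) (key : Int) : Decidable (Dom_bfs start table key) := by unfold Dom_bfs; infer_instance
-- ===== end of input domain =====

-- B replaces A's FIFO deque by level-synchronous (frontier-swap) BFS — no queue,
-- each pass expands the whole frontier into the next one — and computes the minima
-- by a separate reduction after the traversal ('alternative').
-- Both Pythons mutate `table` in place identically; the equivalence proved here is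
-- about the return value.


-- ===== PORT A =====
-- table[ny][nx] read/write; used only under the 0≤ny<size, 0≤nx<size guard, which
-- under Pre_ (probed rows long enough) makes the getD defaults unreachable — exact there.
def getCell (t : List (List Int)) (y x : Int) : Int := (t.getD y.toNat []).getD x.toNat 0
def setCell (t : List (List Int)) (y x v : Int) : List (List Int) :=
  t.set y.toNat ((t.getD y.toNat []).set x.toNat v)

-- move = ((1,0),(0,1),(-1,0),(0,-1))
def moveList : List (Int × Int) := [(1,0),(0,1),(-1,0),(0,-1)]

-- A's loop state: table, queue, block, min_y, min_x
structure StA where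
  t : List (List Int)
  q : List (Int × Int)
  b : List (List Int)
  my : Int
  mx : Int

-- body of A's `for dy, dx in move` loop
def stepA (key notKey size y x : Int) (s : StA) (d : Int × Int) : StA :=
  let ny := y + d.1
  let nx := x + d.2
  if 0 ≤ ny ∧ ny < size ∧ 0 ≤ nx ∧ nx < size ∧ getCell s.t ny nx = key then
    ⟨setCell s.t ny nx notKey, s.q ++ [(ny, nx)], s.b ++ [[ny, nx]],
     min s.my ny, min s.mx nx⟩
  else s

-- A's `while queue` loop; the fuel only guards totality (under Pre_ every enqueue
-- flips a distinct key-cell, so size^2+2 suffices — proved in the lemmas below)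
def loopA (key notKey size : Int) : Nat → StA → StA
  | 0, s => s
  | f+1, s =>
    match s.q with
    | [] => s
    | (y, x) :: qs =>
      loopA key notKey size f (moveList.foldl (stepA key notKey size y x) ⟨s.t, qs, s.b, s.my, s.mx⟩)

def bfs (start : Int × Int) (table : List (List Int)) (key : Int) : List (List Int) :=
  let notKey := (key + 1) * 8
  let size : Int := table.length
  let s := loopA key notKey size (table.length * table.length + 2)
             ⟨table, [start], [[start.1, start.2]], start.1, start.2⟩
  s.b ++ [[s.my, s.mx]]

-- ===== PORT B =====
-- B's level state: table and the next frontier being collected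
structure StL where
  t : List (List Int)
  nx : List (Int × Int)

-- body of B's inner `for dy, dx in move` loop
def nbrStep (key notKey size y x : Int) (s : StL) (d : Int × Int) : StL :=
  let ny := y + d.1
  let nx := x + d.2
  if 0 ≤ ny ∧ ny < size ∧ 0 ≤ nx ∧ nx < size ∧ getCell s.t ny nx = key then
    ⟨setCell s.t ny nx notKey, s.nx ++ [(ny, nx)]⟩
  else s

-- B's `for y, x in frontier` loop body
def cellStep (key notKey size : Int) (s : StL) (c : Int × Int) : StL :=
  moveList.foldl (nbrStep key notKey size c.1 c.2) s

def pairCell (p : Int × Int) : List Int := [p.1, p.2]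

-- B's `while frontier` loop (fuel only guards totality, as in A's port)
def loopB (key notKey size : Int) : Nat → List (List Int) → List (List Int) → List (Int × Int) → List (List Int)
  | 0, _, b, _ => b
  | f+1, t, b, fr =>
    if fr = [] then b
    else
      let s := fr.foldl (cellStep key notKey size) ⟨t, []⟩
      loopB key notKey size f s.t (b ++ s.nx.map pairCell) s.nx

-- `min(c[0] for c in block)` / `min(c[1] for c in block)` on the 2-lists block
def cellY (c : List Int) : Int := c.headD 0
def cellX (c : List Int) : Int := (c.drop 1).headD 0

-- Python's min over a nonempty list of ints
def pyMin (l : List Int) : Int :=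
  match l with
  | [] => 0
  | a :: r => r.foldl min a

def bfs_alt (start : Int × Int) (table : List (List Int)) (key : Int) : List (List Int) :=
  let notKey := (key + 1) * 8
  let size : Int := table.length
  let b := loopB key notKey size (table.length * table.length + 2) table [[start.1, start.2]] [start]
  b ++ [[pyMin (b.map cellY), pyMin (b.map cellX)]]

-- ===== PRECONDITION & SPEC =====
-- A raises IndexError exactly when the fill probes a cell past the end of a row
-- shorter than len(table); Pre_ excludes those inputs by a sound closed-form bound:
-- start's four probes stay within their rows, and no row within distance 1 of a
-- short row contains key (so no cell near a short row is ever popped). The bound is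
-- slightly conservative: it also excludes a few ragged tables whose fill never in
-- fact reaches a short row (both programs return the same value there).
def Pre_bfs (start : Int × Int) (table : List (List Int)) (key : Int) : Prop :=
  (∀ p ∈ ([(start.1 + 1, start.2), (start.1, start.2 + 1), (start.1 - 1, start.2), (start.1, start.2 - 1)] : List (Int × Int)),
      0 ≤ p.1 → p.1 < (table.length : Int) → 0 ≤ p.2 → p.2 < (table.length : Int) →
      p.2 < ((table.getD p.1.toNat []).length : Int)) ∧
  (∀ i ∈ List.range table.length, (table.getD i []).length < table.length →
      ∀ j ∈ List.range table.length, j ≤ i + 1 → i ≤ j + 1 → key ∉ table.getD j [])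
instance (start : Int × Int) (table : List (List Int)) (key : Int) : Decidable (Pre_bfs start table key) := by unfold Pre_bfs; infer_instance

def pvWitness_bfs : (Int × Int) × List (List Int) × Int := ((0, 0), [[1, 1], [1, 0]], 1)

def Spec_bfs (start : Int × Int) (table : List (List Int)) (key : Int) (out : List (List Int)) : Prop := out = bfs_alt start table key
instance (start : Int × Int) (table : List (List Int)) (key : Int) (out : List (List Int)) : Decidable (Spec_bfs start table key out) := by unfold Spec_bfs; infer_instance

-- ===== CLAIM (what is proved, stated in full; the proofs are below) =====
def Claim_equal_bfs : Prop := ∀ (start : Int × Int) (table : List (List Int)) (key : Int), Dom_bfs start table key → Pre_bfs start table key → Spec_bfs start table key (bfs start table key)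

-- ===== LEMMAS AND PROOFS =====

-- a cell whose whole 3-row neighbourhood consists of full-length rows
def Safe (table : List (List Int)) (c : Int × Int) : Prop :=
  0 ≤ c.1 ∧ c.1 < (table.length : Int) ∧ 0 ≤ c.2 ∧ c.2 < (table.length : Int) ∧
  ∀ j : Nat, j < table.length → c.1 - 1 ≤ (j : Int) → (j : Int) ≤ c.1 + 1 →
    table.length ≤ (table.getD j []).length

def Good (start : Int × Int) (table : List (List Int)) (c : Int × Int) : Prop :=
  c = start ∨ Safe table c

-- every in-range probe of c lands inside its row (lengths measured on the ORIGINAL table)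
def RealProbes (table : List (List Int)) (c : Int × Int) : Prop :=
  ∀ d ∈ moveList, 0 ≤ c.1 + d.1 → c.1 + d.1 < (table.length : Int) →
    0 ≤ c.2 + d.2 → c.2 + d.2 < (table.length : Int) →
    (c.2 + d.2).toNat < (table.getD (c.1 + d.1).toNat []).length

-- invariant of the mutated table: row lengths unchanged, and rows near a short row stay key-free
def InvT (key : Int) (table t : List (List Int)) : Prop :=
  (t.length = table.length ∧ ∀ j : Nat, j < table.length → (t.getD j []).length = (table.getD j []).length) ∧
  ∀ i : Nat, i < table.length → (table.getD i []).length < table.length →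
    ∀ j : Nat, j < table.length → j ≤ i + 1 → i ≤ j + 1 → key ∉ t.getD j []

-- number of key-cells within the size×size probed square
def keyCount (key : Int) (n : Nat) (t : List (List Int)) : Nat :=
  (t.map (fun r => (r.take n).count key)).sum

theorem pyMin_append (l m : List Int) (h : l ≠ []) :
    pyMin (l ++ m) = m.foldl min (pyMin l) := by
  cases l with
  | nil => exact absurd rfl h
  | cons a r => simp [pyMin, List.foldl_append]

theorem getD_set (t : List (List Int)) (i j : Nat) (r : List Int) (hi : i < t.length) :
    (t.set i r).getD j [] = if i = j then r else t.getD j [] := by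
  rcases eq_or_ne i j with rfl | h
  · simp [List.getD_eq_getElem?_getD, List.getElem?_set, hi]
  · simp [List.getD_eq_getElem?_getD, List.getElem?_set, h]

theorem sum_map_set (f : List Int → Nat) :
    ∀ (t : List (List Int)) (i : Nat) (r : List Int), i < t.length →
    ((t.set i r).map f).sum + f (t.getD i []) = (t.map f).sum + f r := by
  intro t
  induction t with
  | nil => intro i r hi; simp at hi
  | cons a t ih =>
    intro i r hi
    cases i with
    | zero => simp [List.getD]; omega
    | succ i =>
      have := ih i r (by simpa using hi)
      simp only [List.set, List.map_cons, List.sum_cons, List.getD_cons_succ]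
      omega

theorem sum_counts_le (key : Int) (n : Nat) :
    ∀ t : List (List Int), ((t.map (fun r => (r.take n).count key)).sum ≤ t.length * n) := by
  intro t
  induction t with
  | nil => simp
  | cons a t ih =>
    have h1 : (a.take n).count key ≤ n :=
      le_trans List.count_le_length (by simpa using List.length_take_le (l := a) (n := n))
    simp only [List.map_cons, List.sum_cons, List.length_cons]
    calc (a.take n).count key + (t.map (fun r => (r.take n).count key)).sum
        ≤ n + t.length * n := by omega
      _ = (t.length + 1) * n := by ring

theorem keyCount_le (key : Int) (t : List (List Int)) (n : Nat) (h : t.length = n) :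
    keyCount key n t ≤ n * n := by
  have := sum_counts_le key n t
  rw [h] at this
  exact this

theorem goodReal (start : Int × Int) (table : List (List Int)) (key : Int)
    (hPre : Pre_bfs start table key) (c : Int × Int) (hc : Good start table c) :
    RealProbes table c := by
  intro d hd h1 h2 h3 h4
  rcases hc with rfl | hs
  · obtain ⟨hp, -⟩ := hPre
    simp only [List.mem_cons, List.not_mem_nil, or_false, forall_eq_or_imp, forall_eq] at hp
    obtain ⟨p1, p2, p3, p4⟩ := hp
    simp only [moveList, List.mem_cons, List.not_mem_nil, or_false] at hd
    have e1 : c.1 + (-1 : Int) = c.1 - 1 := by ring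
    have e2 : c.2 + (-1 : Int) = c.2 - 1 := by ring
    rcases hd with rfl | rfl | rfl | rfl <;>
      simp only [add_zero, e1, e2] at h1 h2 h3 h4 ⊢
    · have := p1 h1 h2 h3 h4; omega
    · have := p2 h1 h2 h3 h4; omega
    · have := p3 h1 h2 h3 h4; omega
    · have := p4 h1 h2 h3 h4; omega
  · obtain ⟨hs1, hs2, hs3, hs4, hrow⟩ := hs
    have hd1 : d.1 = 1 ∧ d.2 = 0 ∨ d.1 = 0 ∧ d.2 = 1 ∨ d.1 = -1 ∧ d.2 = 0 ∨ d.1 = 0 ∧ d.2 = -1 := by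
      simp only [moveList, List.mem_cons, List.not_mem_nil, or_false] at hd
      rcases hd with rfl | rfl | rfl | rfl <;> simp
    have hj : ((c.1 + d.1).toNat : Int) = c.1 + d.1 := Int.toNat_of_nonneg h1
    have := hrow (c.1 + d.1).toNat (by omega) (by omega) (by omega)
    omega

-- one probe: invariant and the count+frontier measure are preserved, new cells are Safe
theorem nbrStep_spec (table : List (List Int)) (key : Int)
    (t : List (List Int)) (acc : List (Int × Int)) (c d : Int × Int)
    (hd : d ∈ moveList) (hI : InvT key table t) (hR : RealProbes table c) :
    InvT key table (nbrStep key ((key+1)*8) (table.length : Int) c.1 c.2 ⟨t, acc⟩ d).t ∧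
    keyCount key table.length (nbrStep key ((key+1)*8) (table.length : Int) c.1 c.2 ⟨t, acc⟩ d).t
      + (nbrStep key ((key+1)*8) (table.length : Int) c.1 c.2 ⟨t, acc⟩ d).nx.length
      = keyCount key table.length t + acc.length ∧
    ∀ e ∈ (nbrStep key ((key+1)*8) (table.length : Int) c.1 c.2 ⟨t, acc⟩ d).nx, e ∈ acc ∨ Safe table e := by
  obtain ⟨⟨hlen, hrows⟩, hK⟩ := hI
  by_cases hg : 0 ≤ c.1 + d.1 ∧ c.1 + d.1 < (table.length : Int) ∧ 0 ≤ c.2 + d.2 ∧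
      c.2 + d.2 < (table.length : Int) ∧ getCell t (c.1 + d.1) (c.2 + d.2) = key
  case neg =>
    have hstep : nbrStep key ((key+1)*8) (table.length : Int) c.1 c.2 ⟨t, acc⟩ d = ⟨t, acc⟩ := by
      simp only [nbrStep, if_neg hg]
    rw [hstep]
    exact ⟨⟨⟨hlen, hrows⟩, hK⟩, rfl, fun e he => Or.inl he⟩
  case pos =>
  obtain ⟨g1, g2, g3, g4, g5⟩ := hg
  simp only [nbrStep, if_pos (show 0 ≤ c.1 + d.1 ∧ c.1 + d.1 < (table.length : Int) ∧ 0 ≤ c.2 + d.2 ∧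
      c.2 + d.2 < (table.length : Int) ∧ getCell t (c.1 + d.1) (c.2 + d.2) = key from ⟨g1, g2, g3, g4, g5⟩)]
  set i := (c.1 + d.1).toNat with hidef
  set j := (c.2 + d.2).toNat with hjdef
  have hiI : (i : Int) = c.1 + d.1 := Int.toNat_of_nonneg g1
  have hjI : (j : Int) = c.2 + d.2 := Int.toNat_of_nonneg g3
  have hin : i < table.length := by omega
  have hjn : j < table.length := by omega
  have hitl : i < t.length := by omega
  set row := t.getD i [] with hrowdef
  have hjrow : j < row.length := by
    have h1 := hR d hd g1 g2 g3 g4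
    rw [← hidef, ← hjdef] at h1
    have h2 := hrows i hin
    rw [hrowdef]
    omega
  have hrowj : row[j] = key := by
    have hg5 : row.getD j 0 = key := g5
    rwa [List.getD_eq_getElem?_getD, List.getElem?_eq_getElem hjrow] at hg5
  have hkeymem : key ∈ row := hrowj ▸ List.getElem_mem hjrow
  have hknk : key ≠ (key + 1) * 8 := by omega
  have hset : ∀ j' : Nat, (setCell t (c.1 + d.1) (c.2 + d.2) ((key+1)*8)).getD j' [] =
      if i = j' then row.set j ((key+1)*8) else t.getD j' [] := by
    intro j'
    simp only [setCell, ← hidef, ← hjdef, ← hrowdef]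
    exact getD_set t i j' _ hitl
  refine ⟨⟨⟨?_, ?_⟩, ?_⟩, ?_, ?_⟩
  · simp [setCell, hlen]
  · intro j' hj'
    rw [hset j']
    rcases eq_or_ne i j' with rfl | hne
    · rw [if_pos rfl, List.length_set]
      exact hrows _ hj'
    · rw [if_neg hne]
      exact hrows _ hj'
  · intro i0 hi0 hshort j0 hj0 hji hij
    rw [hset j0]
    rcases eq_or_ne i j0 with rfl | hne
    · rw [if_pos rfl]
      intro hmem
      rcases List.mem_or_eq_of_mem_set hmem with hmem' | heq
      · exact hK i0 hi0 hshort i hj0 hji hij hmem'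
      · exact hknk heq
    · rw [if_neg hne]
      exact hK i0 hi0 hshort j0 hj0 hji hij
  · -- the count equation
    have hjtake : j < (row.take table.length).length := by
      simp [List.length_take]; omega
    have htakeset : ((row.set j ((key+1)*8)).take table.length) = (row.take table.length).set j ((key+1)*8) :=
      List.take_set
    have hcnt : ((row.take table.length).set j ((key+1)*8)).count key + 1 = (row.take table.length).count key := by
      rw [List.count_set hjtake]
      have hgt : (row.take table.length)[j] = row[j] := List.getElem_take
      have hmemtake : key ∈ row.take table.length := by
        rw [← hrowj, ← hgt]
        exact List.getElem_mem hjtake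
      have hpos : 0 < (row.take table.length).count key := List.count_pos_iff.mpr hmemtake
      have hne : (((key+1)*8 : Int) == key) = false := by
        simp only [beq_eq_false_iff_ne, ne_eq]
        omega
      rw [hgt, hrowj, hne]
      simp
      omega
    have hsum := sum_map_set (fun r => (r.take table.length).count key) t i (row.set j ((key+1)*8)) hitl
    simp only [← hrowdef] at hsum
    simp only [keyCount, setCell, ← hidef, ← hjdef, ← hrowdef, List.length_append,
      List.length_cons, List.length_nil]
    rw [htakeset] at hsum
    omega
  · intro e he
    simp only [List.mem_append, List.mem_cons, List.not_mem_nil, or_false] at he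
    rcases he with he | rfl
    · exact Or.inl he
    · refine Or.inr ⟨g1, g2, g3, g4, ?_⟩
      intro j0 hj0 hlo hhi
      by_contra hcon
      push_neg at hcon
      have hk0 := hK j0 hj0 hcon i hin (by omega) (by omega)
      exact hk0 (hrowdef ▸ hkeymem)

theorem nbrFold_spec (table : List (List Int)) (key : Int) (c : Int × Int)
    (hR : RealProbes table c) :
    ∀ (ds : List (Int × Int)), (∀ d ∈ ds, d ∈ moveList) →
    ∀ (t : List (List Int)) (acc : List (Int × Int)), InvT key table t →
    InvT key table (ds.foldl (nbrStep key ((key+1)*8) (table.length : Int) c.1 c.2) ⟨t, acc⟩).t ∧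
    keyCount key table.length (ds.foldl (nbrStep key ((key+1)*8) (table.length : Int) c.1 c.2) ⟨t, acc⟩).t
      + (ds.foldl (nbrStep key ((key+1)*8) (table.length : Int) c.1 c.2) ⟨t, acc⟩).nx.length
      = keyCount key table.length t + acc.length ∧
    ∀ e ∈ (ds.foldl (nbrStep key ((key+1)*8) (table.length : Int) c.1 c.2) ⟨t, acc⟩).nx,
      e ∈ acc ∨ Safe table e := by
  intro ds
  induction ds with
  | nil => intro _ t acc hI; exact ⟨hI, rfl, fun e he => Or.inl he⟩
  | cons d ds ih =>
    intro hsub t acc hI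
    obtain ⟨hI1, hcnt1, hmem1⟩ := nbrStep_spec table key t acc c d (hsub d (by simp)) hI hR
    simp only [List.foldl_cons]
    rcases hs1 : nbrStep key ((key+1)*8) (table.length : Int) c.1 c.2 ⟨t, acc⟩ d with ⟨t1, acc1⟩
    rw [hs1] at hI1 hcnt1 hmem1
    simp only at hI1 hcnt1 hmem1
    obtain ⟨hI2, hcnt2, hmem2⟩ := ih (fun d hd => hsub d (by simp [hd])) t1 acc1 hI1
    refine ⟨hI2, by omega, ?_⟩
    intro e he
    rcases hmem2 e he with he1 | hsafe
    · exact hmem1 e he1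
    · exact Or.inr hsafe

theorem level_spec (start : Int × Int) (table : List (List Int)) (key : Int)
    (hPre : Pre_bfs start table key) :
    ∀ (fr : List (Int × Int)) (t : List (List Int)) (acc : List (Int × Int)),
    InvT key table t → (∀ c ∈ fr, Good start table c) → (∀ e ∈ acc, Safe table e) →
    InvT key table (fr.foldl (cellStep key ((key+1)*8) (table.length : Int)) ⟨t, acc⟩).t ∧
    keyCount key table.length (fr.foldl (cellStep key ((key+1)*8) (table.length : Int)) ⟨t, acc⟩).t
      + (fr.foldl (cellStep key ((key+1)*8) (table.length : Int)) ⟨t, acc⟩).nx.length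
      = keyCount key table.length t + acc.length ∧
    ∀ e ∈ (fr.foldl (cellStep key ((key+1)*8) (table.length : Int)) ⟨t, acc⟩).nx, Safe table e := by
  intro fr
  induction fr with
  | nil => intro t acc hI _ hacc; exact ⟨hI, rfl, hacc⟩
  | cons c fr ih =>
    intro t acc hI hGood hacc
    have hR : RealProbes table c := goodReal start table key hPre c (hGood c (by simp))
    obtain ⟨hI1, hcnt1, hmem1⟩ :=
      nbrFold_spec table key c hR moveList (fun d hd => hd) t acc hI
    simp only [List.foldl_cons]
    rcases hs1 : cellStep key ((key+1)*8) (table.length : Int) ⟨t, acc⟩ c with ⟨t1, acc1⟩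
    have hs1' : moveList.foldl (nbrStep key ((key+1)*8) (table.length : Int) c.1 c.2) ⟨t, acc⟩ = ⟨t1, acc1⟩ := hs1
    rw [hs1'] at hI1 hcnt1 hmem1
    simp only at hI1 hcnt1 hmem1
    have hacc1 : ∀ e ∈ acc1, Safe table e := by
      intro e he
      rcases hmem1 e he with h | h
      · exact hacc e h
      · exact h
    obtain ⟨hI2, hcnt2, hmem2⟩ := ih t1 acc1 hI1 (fun c' hc' => hGood c' (by simp [hc'])) hacc1
    exact ⟨hI2, by omega, hmem2⟩

-- A's inner fold vs B's inner fold: same table, same discoveries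
theorem bridge (key nk n : Int) :
    ∀ (ds : List (Int × Int)) (y x : Int) (t : List (List Int)) (q : List (Int × Int))
      (b : List (List Int)) (my mx : Int) (acc : List (Int × Int)),
    ∃ t' new,
      ds.foldl (nbrStep key nk n y x) ⟨t, acc⟩ = ⟨t', acc ++ new⟩ ∧
      ds.foldl (stepA key nk n y x) ⟨t, q, b, my, mx⟩ =
        ⟨t', q ++ new, b ++ new.map pairCell,
         (new.map Prod.fst).foldl min my, (new.map Prod.snd).foldl min mx⟩ := by
  intro ds
  induction ds with
  | nil =>
    intro y x t q b my mx acc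
    exact ⟨t, [], by simp, by simp⟩
  | cons d ds ih =>
    intro y x t q b my mx acc
    simp only [List.foldl_cons]
    by_cases hg : 0 ≤ y + d.1 ∧ y + d.1 < n ∧ 0 ≤ x + d.2 ∧ x + d.2 < n ∧ getCell t (y + d.1) (x + d.2) = key
    · rw [show nbrStep key nk n y x ⟨t, acc⟩ d =
          ⟨setCell t (y + d.1) (x + d.2) nk, acc ++ [(y + d.1, x + d.2)]⟩ by
        simp only [nbrStep, if_pos hg]]
      rw [show stepA key nk n y x ⟨t, q, b, my, mx⟩ d =
          ⟨setCell t (y + d.1) (x + d.2) nk, q ++ [(y + d.1, x + d.2)],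
           b ++ [[y + d.1, x + d.2]], min my (y + d.1), min mx (x + d.2)⟩ by
        simp only [stepA, if_pos hg]]
      obtain ⟨t', new, h1, h2⟩ := ih y x (setCell t (y + d.1) (x + d.2) nk)
        (q ++ [(y + d.1, x + d.2)]) (b ++ [[y + d.1, x + d.2]])
        (min my (y + d.1)) (min mx (x + d.2)) (acc ++ [(y + d.1, x + d.2)])
      refine ⟨t', (y + d.1, x + d.2) :: new, ?_, ?_⟩
      · rw [h1]; simp
      · rw [h2]; simp [pairCell]
    · rw [show nbrStep key nk n y x ⟨t, acc⟩ d = ⟨t, acc⟩ by simp only [nbrStep, if_neg hg]]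
      rw [show stepA key nk n y x ⟨t, q, b, my, mx⟩ d = ⟨t, q, b, my, mx⟩ by
        simp only [stepA, if_neg hg]]
      exact ih y x t q b my mx acc

-- A consumes one whole level in |fr| pops
theorem levelA (key nk n : Int) :
    ∀ (fr : List (Int × Int)) (t : List (List Int)) (nxt : List (Int × Int))
      (b : List (List Int)) (my mx : Int) (fA : Nat),
    ∃ t' new,
      fr.foldl (cellStep key nk n) ⟨t, nxt⟩ = ⟨t', nxt ++ new⟩ ∧
      loopA key nk n (fr.length + fA) ⟨t, fr ++ nxt, b, my, mx⟩ =
        loopA key nk n fA ⟨t', nxt ++ new, b ++ new.map pairCell,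
          (new.map Prod.fst).foldl min my, (new.map Prod.snd).foldl min mx⟩ := by
  intro fr
  induction fr with
  | nil =>
    intro t nxt b my mx fA
    exact ⟨t, [], by simp, by simp⟩
  | cons c fr ih =>
    intro t nxt b my mx fA
    obtain ⟨cy, cx⟩ := c
    have hfuel : (((cy, cx) :: fr).length + fA) = (fr.length + fA) + 1 := by
      simp [Nat.add_right_comm]
    rw [hfuel]
    have hq : ((cy, cx) :: fr) ++ nxt = (cy, cx) :: (fr ++ nxt) := rfl
    rw [hq]
    show ∃ t' new, _ ∧
      loopA key nk n (fr.length + fA + 1) ⟨t, (cy, cx) :: (fr ++ nxt), b, my, mx⟩ = _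
    rw [show loopA key nk n (fr.length + fA + 1) ⟨t, (cy, cx) :: (fr ++ nxt), b, my, mx⟩ =
        loopA key nk n (fr.length + fA)
          (moveList.foldl (stepA key nk n cy cx) ⟨t, fr ++ nxt, b, my, mx⟩) from rfl]
    obtain ⟨t1, new1, hb1, hb2⟩ := bridge key nk n moveList cy cx t (fr ++ nxt) b my mx nxt
    rw [hb2]
    obtain ⟨t2, new2, hl1, hl2⟩ := ih t1 (nxt ++ new1) (b ++ new1.map pairCell)
      ((new1.map Prod.fst).foldl min my) ((new1.map Prod.snd).foldl min mx) fA
    refine ⟨t2, new1 ++ new2, ?_, ?_⟩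
    · simp only [List.foldl_cons]
      rw [show cellStep key nk n ⟨t, nxt⟩ (cy, cx) = ⟨t1, nxt ++ new1⟩ from hb1]
      rw [hl1, List.append_assoc]
    · rw [show (⟨t1, (fr ++ nxt) ++ new1, (b ++ new1.map pairCell),
            (new1.map Prod.fst).foldl min my, (new1.map Prod.snd).foldl min mx⟩ : StA) =
          ⟨t1, fr ++ (nxt ++ new1), (b ++ new1.map pairCell),
            (new1.map Prod.fst).foldl min my, (new1.map Prod.snd).foldl min mx⟩ by
        rw [List.append_assoc]]
      rw [hl2]
      simp [List.map_append, List.foldl_append, List.append_assoc]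

theorem loopA_nil (key nk n : Int) (f : Nat) (t : List (List Int)) (b : List (List Int)) (my mx : Int) :
    loopA key nk n f ⟨t, [], b, my, mx⟩ = ⟨t, [], b, my, mx⟩ := by
  cases f <;> rfl

theorem map_cellY_pairCell (l : List (Int × Int)) : (l.map pairCell).map cellY = l.map Prod.fst := by
  rw [List.map_map]; rfl

theorem map_cellX_pairCell (l : List (Int × Int)) : (l.map pairCell).map cellX = l.map Prod.snd := by
  rw [List.map_map]; rfl

-- main coupling: from a level boundary, A's queue-loop and B's frontier-loop
-- produce the same block, and A's min fields are pyMin of that block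
theorem mainLoop (start : Int × Int) (table : List (List Int)) (key : Int)
    (hPre : Pre_bfs start table key) :
    ∀ (μ : Nat) (t : List (List Int)) (b : List (List Int)) (my mx : Int)
      (fr : List (Int × Int)) (fA fB : Nat),
    InvT key table t → (∀ c ∈ fr, Good start table c) →
    keyCount key table.length t + fr.length ≤ μ → μ < fA → μ ≤ fB →
    b ≠ [] → my = pyMin (b.map cellY) → mx = pyMin (b.map cellX) →
    (loopA key ((key+1)*8) (table.length : Int) fA ⟨t, fr, b, my, mx⟩).b
        = loopB key ((key+1)*8) (table.length : Int) fB t b fr ∧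
    (loopA key ((key+1)*8) (table.length : Int) fA ⟨t, fr, b, my, mx⟩).my
        = pyMin ((loopB key ((key+1)*8) (table.length : Int) fB t b fr).map cellY) ∧
    (loopA key ((key+1)*8) (table.length : Int) fA ⟨t, fr, b, my, mx⟩).mx
        = pyMin ((loopB key ((key+1)*8) (table.length : Int) fB t b fr).map cellX) := by
  intro μ
  induction μ using Nat.strong_induction_on with
  | _ μ ih =>
    intro t b my mx fr fA fB hI hGood hμ hfA hfB hbne hmy hmx
    cases fr with
    | nil =>
      rw [loopA_nil]
      have hB : loopB key ((key+1)*8) (table.length : Int) fB t b [] = b := by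
        cases fB <;> simp [loopB]
      rw [hB]
      exact ⟨rfl, hmy, hmx⟩
    | cons c fr' =>
      set F := c :: fr' with hF
      have hFlen : 1 ≤ F.length := by simp [hF]
      -- split A's fuel at the level boundary
      have hfA' : fA = F.length + (fA - F.length) := by omega
      obtain ⟨t', new, hfold, hloop⟩ :=
        levelA key ((key+1)*8) (table.length : Int) F t [] b my mx (fA - F.length)
      simp only [List.append_nil, List.nil_append] at hfold hloop
      -- measure bookkeeping for the level
      obtain ⟨hI', hcnt, hSafe⟩ := level_spec start table key hPre F t [] hI hGood (by simp)
      rw [hfold] at hI' hcnt hSafe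
      simp only [List.length_nil, Nat.add_zero] at hcnt
      -- B consumes one fuel unit for the level
      cases fB with
      | zero => omega
      | succ fB' =>
        have hBstep : loopB key ((key+1)*8) (table.length : Int) (fB' + 1) t b F =
            loopB key ((key+1)*8) (table.length : Int) fB' t' (b ++ new.map pairCell) new := by
          rw [show loopB key ((key+1)*8) (table.length : Int) (fB' + 1) t b F =
              if F = [] then b else
                loopB key ((key+1)*8) (table.length : Int) fB'
                  (F.foldl (cellStep key ((key+1)*8) (table.length : Int)) ⟨t, []⟩).t
                  (b ++ (F.foldl (cellStep key ((key+1)*8) (table.length : Int)) ⟨t, []⟩).nx.map pairCell)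
                  (F.foldl (cellStep key ((key+1)*8) (table.length : Int)) ⟨t, []⟩).nx from rfl]
          rw [if_neg (by simp [hF]), hfold]
        -- apply the induction hypothesis one level down
        have hmy' : (new.map Prod.fst).foldl min my = pyMin ((b ++ new.map pairCell).map cellY) := by
          rw [List.map_append, pyMin_append _ _ (by simpa using hbne), map_cellY_pairCell, hmy]
        have hmx' : (new.map Prod.snd).foldl min mx = pyMin ((b ++ new.map pairCell).map cellX) := by
          rw [List.map_append, pyMin_append _ _ (by simpa using hbne), map_cellX_pairCell, hmx]
        have hres := ih (keyCount key table.length t) (by omega)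
          t' (b ++ new.map pairCell)
          ((new.map Prod.fst).foldl min my) ((new.map Prod.snd).foldl min mx)
          new (fA - F.length) fB'
          hI' (fun e he => Or.inr (hSafe e he)) (by omega) (by omega) (by omega)
          (by simp [hbne]) hmy' hmx'
        rw [hfA', hloop, hBstep]
        exact hres

theorem bfs_eq_alt (start : Int × Int) (table : List (List Int)) (key : Int)
    (hPre : Pre_bfs start table key) :
    bfs start table key = bfs_alt start table key := by
  unfold bfs bfs_alt
  have hI0 : InvT key table table := by
    refine ⟨⟨rfl, fun j _ => rfl⟩, ?_⟩
    intro i hin hshort j hjn hji hij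
    exact hPre.2 i (List.mem_range.mpr hin) hshort j (List.mem_range.mpr hjn) hji hij
  have hGood0 : ∀ c ∈ [start], Good start table c := by
    intro c hc
    simp only [List.mem_singleton] at hc
    exact Or.inl hc
  have hcnt0 : keyCount key table.length table + ([start] : List (Int × Int)).length ≤
      table.length * table.length + 1 := by
    have := keyCount_le key table table.length rfl
    simp only [List.length_cons, List.length_nil]
    omega
  obtain ⟨hb, hmy, hmx⟩ := mainLoop start table key hPre
    (table.length * table.length + 1) table [[start.1, start.2]] start.1 start.2
    [start] (table.length * table.length + 2) (table.length * table.length + 2)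
    hI0 hGood0 hcnt0 (by omega) (by omega) (by simp)
    (by simp [pyMin, cellY]) (by simp [pyMin, cellX])
  simp only [hb, hmy, hmx]

-- ===== VERDICT (by name: the statement is the Claim_ definition above) =====
theorem bfs_spec : Claim_equal_bfs := by
  intro start table key _ hPre
  unfold Spec_bfs
  exact bfs_eq_alt start table key hPre
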